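-- pv_equiv track=rewrite | github.com/DiegoAlb09/Euler2D | generator/topology_codes_extended.py | f8_to_f4
-- ===== SOURCE A (Python) =====
-- def f8_to_f4(f8_code, metodo='filtrar'):
--     """
--     Convierte el código F8 a F4 usando un método específico de conversión.
--
--     Args:
--         f8_code: Código F8 como string
--         metodo: Método de conversión ('aproximar' o 'filtrar')
--
--     Returns:
--         str: Código F4
--     """
--     if metodo == 'aproximar':
--         # Mapeo que aproxima las diagonales a la dirección más cercana
--         mapa_f8_f4 = {
--             '0': '0',  # Este (→)
--             '1': '0',  # Noreste (↗) → Este (→)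
--             '2': '2',  # Norte (↑)
--             '3': '2',  # Noroeste (↖) → Norte (↑)
--             '4': '4',  # Oeste (←)
--             '5': '4',  # Suroeste (↙) → Oeste (←)
--             '6': '6',  # Sur (↓)
--             '7': '6'   # Sureste (↘) → Sur (↓)
--         }
--     elif metodo == 'filtrar':
--         # Mapeo que solo mantiene las direcciones principales
--         mapa_f8_f4 = {
--             '0': '0',  # Este (→)
--             '2': '2',  # Norte (↑)
--             '4': '4',  # Oeste (←)
--             '6': '6'   # Sur (↓)
--         }
--     else:
--         raise ValueError(f"Método de conversión '{metodo}' no válido. Use 'aproximar' o 'filtrar'.")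
--
--     # Convertir cada dígito del código F8
--     codigo_f4 = []
--     for digito in f8_code:
--         if digito in mapa_f8_f4:
--             codigo_f4.append(mapa_f8_f4[digito])
--
--     # Unir los dígitos en una cadena
--     return ''.join(codigo_f4)
-- ===== SOURCE B (Python) =====
-- def f8_to_f4(f8_code, metodo='filtrar'):
--     if metodo == 'aproximar':
--         # stage 1: whole-string rewrites quantizing each diagonal to its axis
--         for diag in '1357':
--             f8_code = f8_code.replace(diag, chr(ord(diag) - 1))
--     elif metodo != 'filtrar':
--         raise ValueError(f"Método de conversión '{metodo}' no válido. Use 'aproximar' o 'filtrar'.")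
--     # stage 2: delete every distinct non-principal character by whole-string replace
--     # (deletions commute, so the set's iteration order cannot affect the result)
--     for c in set(f8_code):
--         if c not in '0246':
--             f8_code = f8_code.replace(c, '')
--     return f8_code
-- ===== Notes on version B (the rewrite author's own statement) =====
-- stated objective: alternative
-- what changed: Replaces A's single guarded-append loop with per-character dict lookups by staged whole-string rewrites: str.replace passes that quantize each diagonal digit to its axis (for 'aproximar'), then a loop over the distinct characters of the string deleting every non-principal one with str.replace.
-- outside the precondition, e.g. on f8_to_f4('024', 'otro'): A raises ValueError, B raises ValueError
import Mathlib
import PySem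

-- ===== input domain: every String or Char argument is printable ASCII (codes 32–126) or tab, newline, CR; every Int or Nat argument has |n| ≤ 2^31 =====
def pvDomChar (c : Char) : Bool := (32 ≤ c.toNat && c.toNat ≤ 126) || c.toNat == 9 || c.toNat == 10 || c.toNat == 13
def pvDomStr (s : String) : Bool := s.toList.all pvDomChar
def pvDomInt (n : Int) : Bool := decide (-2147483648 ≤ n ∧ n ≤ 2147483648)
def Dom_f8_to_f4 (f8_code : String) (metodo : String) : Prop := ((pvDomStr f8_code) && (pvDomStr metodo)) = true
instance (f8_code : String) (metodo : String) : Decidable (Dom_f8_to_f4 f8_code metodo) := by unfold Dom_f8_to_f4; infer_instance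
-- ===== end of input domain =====

-- B replaces A's guarded-append loop with dict lookups by staged whole-string
-- rewrites: replace-passes quantizing diagonals, then deletion of each distinct
-- non-principal character (objective: alternative). A's ValueError on an unknown
-- metodo is excluded by Pre_.

-- ===== PORT A =====
def mapaAprox : PySem.Dict Char Char :=
  PySem.Dict.ofList [('0','0'), ('1','0'), ('2','2'), ('3','2'),
                     ('4','4'), ('5','4'), ('6','6'), ('7','6')]

def mapaFiltrar : PySem.Dict Char Char :=
  PySem.Dict.ofList [('0','0'), ('2','2'), ('4','4'), ('6','6')]

-- 'if digito in mapa: append(mapa[digito])' rendered as a match on get?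
-- (contains + guarded lookup combined; exact since the lookup is guarded).
def f8Loop (mapa : PySem.Dict Char Char) (f8_code : String) : List Char :=
  f8_code.toList.foldl
    (fun acc d => match mapa.get? d with
                  | some v => acc ++ [v]
                  | none => acc) []

def f8_to_f4 (f8_code : String) (metodo : String) : String :=
  if metodo = "aproximar" then String.mk (f8Loop mapaAprox f8_code)
  else if metodo = "filtrar" then String.mk (f8Loop mapaFiltrar f8_code)
  else ""  -- unreachable under Pre_f8_to_f4 (Python raises ValueError here)

-- ===== PORT B =====
-- s.replace(a, b) for single characters is exactly a character map …
def replChar (l : List Char) (a b : Char) : List Char :=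
  l.map (fun x => if x = a then b else x)

-- … and s.replace(a, '') is exactly a character filter.
def delChar (l : List Char) (a : Char) : List Char :=
  l.filter (fun x => x != a)

-- stage 2 of Source B: 'for c in set(s): if c not in "0246": s = s.replace(c, "")'.
-- Python's set iteration order is arbitrary, but deletions commute, so the
-- result is order-independent (proved: it equals a filter, see foldl_del).
def borraInvalidos (l : List Char) : List Char :=
  (PySem.Set.ofList l).foldl
    (fun s c => if "0246".toList.contains c then s else delChar s c) l

def f8_to_f4_alt (f8_code : String) (metodo : String) : String :=
  let s1 := if metodo = "aproximar"
            then "1357".toList.foldl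
                   (fun s d => replChar s d (Char.ofNat (d.toNat - 1)))
                   f8_code.toList
            else f8_code.toList
  if metodo = "aproximar" ∨ metodo = "filtrar" then
    String.mk (borraInvalidos s1)
  else ""  -- unreachable under Pre_f8_to_f4 (Python raises ValueError here)

-- ===== PRECONDITION & SPEC =====
-- A raises ValueError for any metodo other than 'aproximar'/'filtrar'; Pre_ excludes exactly those.
def Pre_f8_to_f4 (f8_code : String) (metodo : String) : Prop :=
  metodo = "aproximar" ∨ metodo = "filtrar"
instance (f8_code : String) (metodo : String) : Decidable (Pre_f8_to_f4 f8_code metodo) := by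
  unfold Pre_f8_to_f4; infer_instance

def pvWitness_f8_to_f4 : String × String := ("01234567", "aproximar")

def Spec_f8_to_f4 (f8_code : String) (metodo : String) (out : String) : Prop := out = f8_to_f4_alt f8_code metodo
instance (f8_code : String) (metodo : String) (out : String) : Decidable (Spec_f8_to_f4 f8_code metodo out) := by unfold Spec_f8_to_f4; infer_instance

-- ===== CLAIM =====
def Claim_equal_f8_to_f4 : Prop := ∀ (f8_code : String) (metodo : String), Dom_f8_to_f4 f8_code metodo → Pre_f8_to_f4 f8_code metodo → Spec_f8_to_f4 f8_code metodo (f8_to_f4 f8_code metodo)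

-- ===== LEMMAS AND PROOFS =====

-- the quantization B's four replace-passes compose to
def quant (c : Char) : Char :=
  if c = '1' then '0' else if c = '3' then '2'
  else if c = '5' then '4' else if c = '7' then '6' else c

-- stage 1 of B is the single map of quant
lemma stage1_eq (l : List Char) :
    "1357".toList.foldl (fun s d => replChar s d (Char.ofNat (d.toNat - 1))) l
      = l.map quant := by
  show replChar (replChar (replChar (replChar l '1' _) '3' _) '5' _) '7' _ = _
  simp only [replChar, List.map_map]
  apply List.map_congr_left
  intro c _
  simp only [Function.comp]
  unfold quant
  by_cases h1 : c = '1'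
  · subst h1; decide
  by_cases h3 : c = '3'
  · subst h3; decide
  by_cases h5 : c = '5'
  · subst h5; decide
  by_cases h7 : c = '7'
  · subst h7; decide
  simp [h1, h3, h5, h7]

-- folding the deletion step over any list of candidate characters is a filter
lemma foldl_del (cs : List Char) (s : List Char) :
    cs.foldl (fun s c => if "0246".toList.contains c then s else delChar s c) s
      = s.filter (fun x => "0246".toList.contains x || !cs.contains x) := by
  induction cs generalizing s with
  | nil => simp
  | cons c t ih =>
      by_cases h : "0246".toList.contains c = true
      · rw [List.foldl_cons, if_pos h, ih]
        apply List.filter_congr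
        intro x _
        by_cases hx : x = c
        · subst hx; simp [h]; intro _; simpa using h
        · simp [List.contains_cons, hx]
      · rw [List.foldl_cons, if_neg h, ih, delChar, List.filter_filter]
        apply List.filter_congr
        intro x _
        by_cases hx : x = c
        · subst hx; simp [h]; simpa using h
        · simp [List.contains_cons, hx]

-- B's stage 2 keeps exactly the principal directions
lemma borraInvalidos_eq (l : List Char) :
    borraInvalidos l = l.filter (fun x => "0246".toList.contains x) := by
  rw [borraInvalidos, foldl_del]
  apply List.filter_congr
  intro x hx
  have hm : (PySem.Set.ofList l).contains x = true := by
    simpa [PySem.Set.mem_ofList] using hx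
  simp [hm]
  intro hnot
  exact absurd (by simpa [PySem.Set.mem_ofList] using hm) hnot

-- A's append-loop is the filterMap of the lookup
lemma f8Loop_eq (mapa : PySem.Dict Char Char) (acc : List Char) (l : List Char) :
    l.foldl (fun acc d => match mapa.get? d with
                  | some v => acc ++ [v]
                  | none => acc) acc = acc ++ l.filterMap mapa.get? := by
  induction l generalizing acc with
  | nil => simp
  | cons c t ih =>
      cases h : mapa.get? c <;> simp [List.foldl_cons, h, ih]

-- filtering a mapped list as a filterMap of the source
lemma filter_map_eq_filterMap (f : Char → Char) (p : Char → Bool) (l : List Char) :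
    (l.map f).filter p = l.filterMap (fun c => if p (f c) then some (f c) else none) := by
  induction l with
  | nil => rfl
  | cons c t ih => by_cases h : p (f c) <;> simp [List.filter_cons, h, ih]

-- per-character: A's 'aproximar' dictionary equals B's quantize-then-keep
lemma point_aprox (c : Char) :
    (if "0246".toList.contains (quant c) then some (quant c) else none)
      = mapaAprox.get? c := by
  by_cases h0 : c = '0'
  · subst h0; decide
  by_cases h1 : c = '1'
  · subst h1; decide
  by_cases h2 : c = '2'
  · subst h2; decide
  by_cases h3 : c = '3'
  · subst h3; decide
  by_cases h4 : c = '4'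
  · subst h4; decide
  by_cases h5 : c = '5'
  · subst h5; decide
  by_cases h6 : c = '6'
  · subst h6; decide
  by_cases h7 : c = '7'
  · subst h7; decide
  have hq : quant c = c := by simp [quant, h1, h3, h5, h7]
  rw [hq]
  simp [mapaAprox, PySem.Dict.ofList, PySem.Dict.update, List.foldl,
        PySem.Dict.get?_insert, PySem.Dict.get?_empty,
        h0, h1, h2, h3, h4, h5, h6, h7]

-- per-character: A's 'filtrar' dictionary equals B's membership filter
lemma point_filtrar (c : Char) :
    (if "0246".toList.contains c then some c else none) = mapaFiltrar.get? c := by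
  by_cases h0 : c = '0'
  · subst h0; decide
  by_cases h2 : c = '2'
  · subst h2; decide
  by_cases h4 : c = '4'
  · subst h4; decide
  by_cases h6 : c = '6'
  · subst h6; decide
  simp [mapaFiltrar, PySem.Dict.ofList, PySem.Dict.update, List.foldl,
        PySem.Dict.get?_insert, PySem.Dict.get?_empty, h0, h2, h4, h6]

lemma filter_eq_filterMap (p : Char → Bool) (l : List Char) :
    l.filter p = l.filterMap (fun c => if p c then some c else none) := by
  induction l with
  | nil => rfl
  | cons c t ih => by_cases h : p c <;> simp [List.filter_cons, h, ih]

-- ===== VERDICT =====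
theorem f8_to_f4_spec : Claim_equal_f8_to_f4 := by
  intro f8 metodo _ hpre
  unfold Spec_f8_to_f4
  rcases hpre with h | h <;> subst h <;>
    simp only [f8_to_f4, f8_to_f4_alt, String.reduceEq, reduceIte, or_true, true_or,
               f8Loop, f8Loop_eq, List.nil_append, stage1_eq, borraInvalidos_eq]
  · rw [filter_map_eq_filterMap]
    exact congrArg String.mk (List.filterMap_congr (fun c _ => point_aprox c)).symm
  · rw [filter_eq_filterMap]
    exact congrArg String.mk (List.filterMap_congr (fun c _ => point_filtrar c)).symm
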